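-- pv_equiv track=rewrite | github.com/DrNogNog/Probability-and-Combinatoric-Structures | ps6.py | do_parts_cover_set
-- ===== SOURCE A (Python) =====
-- def do_parts_cover_set(s, p):
--     for x in s:
--         found = False
--         for e in p:
--             if x in e:
--                 found = True
--         if not found:
--             return False
--
--     return True
-- ===== SOURCE B (Python) =====
-- def do_parts_cover_set(s, p):
--     covered = set()
--     for e in p:
--         covered.update(e)
--     return all(x in covered for x in s)
-- ===== Notes on version B (the rewrite author's own statement) =====
-- stated objective: faster
-- what changed: B builds the union of all parts once as a hash set and then tests each element of s with one O(1) membership check, replacing A's rescan of every part (with list membership) for every element.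
import Mathlib
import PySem

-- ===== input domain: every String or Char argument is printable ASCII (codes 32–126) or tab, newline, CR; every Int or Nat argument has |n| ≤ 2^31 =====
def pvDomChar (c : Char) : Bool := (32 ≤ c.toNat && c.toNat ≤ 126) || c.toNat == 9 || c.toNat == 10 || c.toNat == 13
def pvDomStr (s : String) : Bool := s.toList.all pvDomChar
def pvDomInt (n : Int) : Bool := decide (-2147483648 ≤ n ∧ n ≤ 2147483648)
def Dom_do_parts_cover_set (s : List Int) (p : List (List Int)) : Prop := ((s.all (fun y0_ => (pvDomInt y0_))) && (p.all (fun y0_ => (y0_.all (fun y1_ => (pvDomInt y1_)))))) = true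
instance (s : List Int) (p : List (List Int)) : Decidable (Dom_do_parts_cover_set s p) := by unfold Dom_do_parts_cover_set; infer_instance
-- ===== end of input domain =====

-- B replaces A's per-element rescan of every part with one set union over the parts followed by a single membership scan (faster mechanism).

-- ===== PORT A =====
-- A: for each x in s, rescan ALL parts setting 'found'; return False on the first uncovered x.
def doPartsCoverLoopA (p : List (List Int)) : List Int → Bool
  | [] => true
  | x :: rest =>
    let found := p.foldl (fun f e => if e.contains x then true else f) false
    if !found then false else doPartsCoverLoopA p rest

def do_parts_cover_set (s : List Int) (p : List (List Int)) : Bool :=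
  doPartsCoverLoopA p s

-- ===== PORT B =====
-- B: union all parts into one set, then a single all-membership scan over s (different algorithm: set union + O(1)-lookup scan).
def do_parts_cover_set_alt (s : List Int) (p : List (List Int)) : Bool :=
  let covered := p.foldl (fun acc e => PySem.Set.update acc e) PySem.Set.empty
  s.all (fun x => PySem.Set.contains covered x)

-- ===== PRECONDITION & SPEC =====
def Spec_do_parts_cover_set (s : List Int) (p : List (List Int)) (out : Bool) : Prop := out = do_parts_cover_set_alt s p
instance (s : List Int) (p : List (List Int)) (out : Bool) : Decidable (Spec_do_parts_cover_set s p out) := by unfold Spec_do_parts_cover_set; infer_instance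

-- ===== CLAIM (what is proved, stated in full; the proofs are below) =====
def Claim_equal_do_parts_cover_set : Prop := ∀ (s : List Int) (p : List (List Int)), Dom_do_parts_cover_set s p → Spec_do_parts_cover_set s p (do_parts_cover_set s p)

-- ===== LEMMAS AND PROOFS =====

-- A's inner fold computes "some part contains x".
theorem foldA_eq_any (x : Int) (p : List (List Int)) (b : Bool) :
    p.foldl (fun f e => if e.contains x then true else f) b = (b || p.any (fun e => e.contains x)) := by
  induction p generalizing b with
  | nil => simp
  | cons e rest ih =>
    simp only [List.foldl_cons, List.any_cons]
    rw [ih]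
    by_cases h : x ∈ e <;> simp [h]

-- A's loop computes "every element of s is covered by some part".
theorem loopA_eq_all (p : List (List Int)) (s : List Int) :
    doPartsCoverLoopA p s = s.all (fun x => p.any (fun e => e.contains x)) := by
  induction s with
  | nil => rfl
  | cons x rest ih =>
    simp only [doPartsCoverLoopA, foldA_eq_any, Bool.false_or, List.all_cons]
    cases h : p.any (fun e => e.contains x)
    · simp only [Bool.not_false, Bool.false_and, if_true]
    · simp only [Bool.not_true, Bool.true_and, Bool.false_eq_true, if_false, ih]

-- Membership in the folded union set = membership in some part.
theorem mem_union_fold (p : List (List Int)) (acc : PySem.Set Int) (x : Int) :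
    (x ∈ p.foldl (fun a e => PySem.Set.update a e) acc) ↔ (x ∈ acc ∨ ∃ e ∈ p, x ∈ e) := by
  induction p generalizing acc with
  | nil => simp
  | cons e rest ih =>
    simp [List.foldl_cons, ih, PySem.Set.mem_update, or_assoc]

-- ===== VERDICT (by name: the statement is the Claim_ definition above) =====
theorem do_parts_cover_set_spec : Claim_equal_do_parts_cover_set := by
  intro s p _
  unfold Spec_do_parts_cover_set do_parts_cover_set do_parts_cover_set_alt
  rw [loopA_eq_all]
  have hpt : ∀ x : Int, (p.any fun e => e.contains x)
      = (List.foldl (fun acc e => PySem.Set.update acc e) PySem.Set.empty p).contains x := by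
    intro x
    rw [Bool.eq_iff_iff]
    simp [mem_union_fold, List.any_eq_true]
  simp only [hpt]
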